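-- pv_equiv track=rewrite | github.com/fazekaszs/loco_hd | python_codes/compare_h5_batch.py | assign_primitive_type
-- ===== SOURCE A (Python) =====
-- from typing import List, Union, Tuple
--
-- TERMINAL_O = ["OT1", "OT2", "OC1", "OC2", "OXT"]
--
-- PRIMITIVE_TYPES = ["O_neg", "O_neu", "N_pos", "N_neu", "C_ali", "C_aro", "S"]
--
-- SIDECHAIN_ATOMS = [
--         ["GLU:OE1", "GLU:OE2", "ASP:OD1", "ASP:OD2"],
--         ["GLN:OE1", "ASN:OD1", "SER:OG", "THR:OG1", "TYR:OH"],
--         ["ARG:NE", "ARG:NH1", "ARG:NH2", "LYS:NZ"],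
--         ["GLN:NE2", "ASN:ND2", "HIS:ND1", "HIS:NE2", "TRP:NE1"],
--         ["ALA:CB", "VAL:CB", "VAL:CG1", "VAL:CG2", "ILE:CB", "ILE:CG1",
--          "ILE:CG2", "ILE:CD1", "ILE:CD", "LEU:CB", "LEU:CG", "LEU:CD1",
--          "LEU:CD2", "PHE:CB", "SER:CB", "THR:CB", "THR:CG2", "ASP:CB",
--          "ASP:CG", "ASN:CB", "ASN:CG", "GLU:CB", "GLU:CG", "GLU:CD",
--          "GLN:CB", "GLN:CG", "GLN:CD", "ARG:CB", "ARG:CG", "ARG:CD",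
--          "ARG:CE", "ARG:CZ", "LYS:CB", "LYS:CG", "LYS:CD", "LYS:CE",
--          "HIS:CB", "CYS:CB", "MET:CB", "MET:CG", "MET:CE", "PRO:CB",
--          "PRO:CG", "PRO:CD", "TYR:CB", "TRP:CB"],
--         ["HIS:CG", "HIS:CD2", "HIS:CE1", "PHE:CG", "PHE:CD1", "PHE:CD2",
--          "PHE:CE1", "PHE:CE2", "PHE:CZ", "TYR:CG", "TYR:CD1", "TYR:CD2",
--          "TYR:CE1", "TYR:CE2", "TYR:CZ", "TRP:CG", "TRP:CD1", "TRP:CD2",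
--          "TRP:CE2", "TRP:CE3", "TRP:CZ2", "TRP:CZ3", "TRP:CH2"],
--         ["CYS:SG", "MET:SD"]
-- ]
--
-- def assign_primitive_type(resi_name: str, atom_name: str) -> Union[str, None]:
--
--     # Backbone atoms:
--     if atom_name in ["CA", "C"]:
--         return "C_ali"
--     if atom_name == "O":
--         return "O_neu"
--     if atom_name == "N":
--         return "N_neu"
--     if atom_name in TERMINAL_O:
--         return "O_neg"
--
--     # Sidechain atoms:
--     for group_idx, atom_group in enumerate(SIDECHAIN_ATOMS):
--         if f"{resi_name}:{atom_name}" in atom_group: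
--             return PRIMITIVE_TYPES[group_idx]
--
--     return None
-- ===== SOURCE B (Python) =====
-- TERMINAL_O = ["OT1", "OT2", "OC1", "OC2", "OXT"]
--
-- PRIMITIVE_TYPES = ["O_neg", "O_neu", "N_pos", "N_neu", "C_ali", "C_aro", "S"]
--
-- SIDECHAIN_ATOMS = [
--         ["GLU:OE1", "GLU:OE2", "ASP:OD1", "ASP:OD2"],
--         ["GLN:OE1", "ASN:OD1", "SER:OG", "THR:OG1", "TYR:OH"],
--         ["ARG:NE", "ARG:NH1", "ARG:NH2", "LYS:NZ"],
--         ["GLN:NE2", "ASN:ND2", "HIS:ND1", "HIS:NE2", "TRP:NE1"],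
--         ["ALA:CB", "VAL:CB", "VAL:CG1", "VAL:CG2", "ILE:CB", "ILE:CG1",
--          "ILE:CG2", "ILE:CD1", "ILE:CD", "LEU:CB", "LEU:CG", "LEU:CD1",
--          "LEU:CD2", "PHE:CB", "SER:CB", "THR:CB", "THR:CG2", "ASP:CB",
--          "ASP:CG", "ASN:CB", "ASN:CG", "GLU:CB", "GLU:CG", "GLU:CD",
--          "GLN:CB", "GLN:CG", "GLN:CD", "ARG:CB", "ARG:CG", "ARG:CD",
--          "ARG:CE", "ARG:CZ", "LYS:CB", "LYS:CG", "LYS:CD", "LYS:CE",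
--          "HIS:CB", "CYS:CB", "MET:CB", "MET:CG", "MET:CE", "PRO:CB",
--          "PRO:CG", "PRO:CD", "TYR:CB", "TRP:CB"],
--         ["HIS:CG", "HIS:CD2", "HIS:CE1", "PHE:CG", "PHE:CD1", "PHE:CD2",
--          "PHE:CE1", "PHE:CE2", "PHE:CZ", "TYR:CG", "TYR:CD1", "TYR:CD2",
--          "TYR:CE1", "TYR:CE2", "TYR:CZ", "TRP:CG", "TRP:CD1", "TRP:CD2",
--          "TRP:CE2", "TRP:CE3", "TRP:CZ2", "TRP:CZ3", "TRP:CH2"],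
--         ["CYS:SG", "MET:SD"]
-- ]
--
-- # Residue-independent backbone atoms, one table instead of four guard tests.
-- BACKBONE_TYPES = {
--     "CA": "C_ali", "C": "C_ali", "O": "O_neu", "N": "N_neu",
--     "OT1": "O_neg", "OT2": "O_neg", "OC1": "O_neg", "OC2": "O_neg", "OXT": "O_neg",
-- }
--
-- # Sorted flat table of ("RESI:ATOM", type) pairs, searched by binary search.
-- _TABLE = sorted(
--     (resi_atom, PRIMITIVE_TYPES[group_idx])
--     for group_idx, atom_group in enumerate(SIDECHAIN_ATOMS)
--     for resi_atom in atom_group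
-- )
-- SIDECHAIN_KEYS = [k for k, _ in _TABLE]
-- SIDECHAIN_TYPES = [t for _, t in _TABLE]
--
-- def assign_primitive_type(resi_name, atom_name):
--
--     bb = BACKBONE_TYPES.get(atom_name)
--     if bb is not None:
--         return bb
--
--     key = f"{resi_name}:{atom_name}"
--     lo, hi = 0, len(SIDECHAIN_KEYS)
--     while lo < hi:
--         mid = (lo + hi) // 2
--         if SIDECHAIN_KEYS[mid] < key:
--             lo = mid + 1
--         else:
--             hi = mid
--     if lo < len(SIDECHAIN_KEYS) and SIDECHAIN_KEYS[lo] == key: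
--         return SIDECHAIN_TYPES[lo]
--     return None
-- ===== Notes on version B (the rewrite author's own statement) =====
-- stated objective: alternative
-- what changed: B replaces A's four-guard chain plus per-call linear scan of the seven sidechain groups by one backbone-dict lookup followed by hand-written binary search in a flat ('RESI:ATOM', type) table sorted once at module load.
import Mathlib
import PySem

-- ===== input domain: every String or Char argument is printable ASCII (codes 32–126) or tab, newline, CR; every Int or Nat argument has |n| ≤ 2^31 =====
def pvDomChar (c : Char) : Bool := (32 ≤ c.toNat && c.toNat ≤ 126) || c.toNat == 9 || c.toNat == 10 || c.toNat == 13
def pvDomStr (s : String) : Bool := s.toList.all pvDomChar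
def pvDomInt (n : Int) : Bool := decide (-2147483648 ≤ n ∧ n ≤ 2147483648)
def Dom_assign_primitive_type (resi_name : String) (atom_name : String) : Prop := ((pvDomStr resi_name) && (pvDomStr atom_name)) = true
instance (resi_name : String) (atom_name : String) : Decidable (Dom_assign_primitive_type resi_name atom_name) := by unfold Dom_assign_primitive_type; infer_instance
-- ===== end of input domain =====

-- B replaces A's guard chain + per-call linear scan over the seven sidechain groups by one
-- backbone-dict lookup plus binary search in a flat table sorted once at module load (objective: alternative).

-- ===== PORT A =====
-- module constants (part of the Python module, shared by both versions)
def TERMINAL_O : List String := ["OT1", "OT2", "OC1", "OC2", "OXT"]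

def PRIMITIVE_TYPES : List String := ["O_neg", "O_neu", "N_pos", "N_neu", "C_ali", "C_aro", "S"]

def SIDECHAIN_ATOMS : List (List String) :=
  [ ["GLU:OE1", "GLU:OE2", "ASP:OD1", "ASP:OD2"],
    ["GLN:OE1", "ASN:OD1", "SER:OG", "THR:OG1", "TYR:OH"],
    ["ARG:NE", "ARG:NH1", "ARG:NH2", "LYS:NZ"],
    ["GLN:NE2", "ASN:ND2", "HIS:ND1", "HIS:NE2", "TRP:NE1"],
    ["ALA:CB", "VAL:CB", "VAL:CG1", "VAL:CG2", "ILE:CB", "ILE:CG1",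
     "ILE:CG2", "ILE:CD1", "ILE:CD", "LEU:CB", "LEU:CG", "LEU:CD1",
     "LEU:CD2", "PHE:CB", "SER:CB", "THR:CB", "THR:CG2", "ASP:CB",
     "ASP:CG", "ASN:CB", "ASN:CG", "GLU:CB", "GLU:CG", "GLU:CD",
     "GLN:CB", "GLN:CG", "GLN:CD", "ARG:CB", "ARG:CG", "ARG:CD",
     "ARG:CE", "ARG:CZ", "LYS:CB", "LYS:CG", "LYS:CD", "LYS:CE",
     "HIS:CB", "CYS:CB", "MET:CB", "MET:CG", "MET:CE", "PRO:CB",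
     "PRO:CG", "PRO:CD", "TYR:CB", "TRP:CB"],
    ["HIS:CG", "HIS:CD2", "HIS:CE1", "PHE:CG", "PHE:CD1", "PHE:CD2",
     "PHE:CE1", "PHE:CE2", "PHE:CZ", "TYR:CG", "TYR:CD1", "TYR:CD2",
     "TYR:CE1", "TYR:CE2", "TYR:CZ", "TRP:CG", "TRP:CD1", "TRP:CD2",
     "TRP:CE2", "TRP:CE3", "TRP:CZ2", "TRP:CZ3", "TRP:CH2"],
    ["CYS:SG", "MET:SD"] ]

-- A's 'for group_idx, atom_group in enumerate(SIDECHAIN_ATOMS): if key in atom_group: return PRIMITIVE_TYPES[group_idx]'.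
-- The index is an enumerate index over the 7-element table, always in range, so pyGetD is exact for PRIMITIVE_TYPES[group_idx].
def scanGroups (key : String) : List (Int × List String) → Option String
  | [] => none
  | (i, g) :: rest =>
      if key ∈ g then some (PySem.List.pyGetD PRIMITIVE_TYPES i "") else scanGroups key rest

def assign_primitive_type (resi_name : String) (atom_name : String) : Option String :=
  if atom_name ∈ (["CA", "C"] : List String) then some "C_ali"
  else if atom_name = "O" then some "O_neu"
  else if atom_name = "N" then some "N_neu"
  else if atom_name ∈ TERMINAL_O then some "O_neg"
  else scanGroups (resi_name ++ ":" ++ atom_name) (PySem.List.enumerate SIDECHAIN_ATOMS)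

-- ===== PORT B =====
-- the module-level dict literal BACKBONE_TYPES
def BACKBONE_TYPES : PySem.Dict String String :=
  PySem.Dict.ofList
    [("CA", "C_ali"), ("C", "C_ali"), ("O", "O_neu"), ("N", "N_neu"),
     ("OT1", "O_neg"), ("OT2", "O_neg"), ("OC1", "O_neg"), ("OC2", "O_neg"), ("OXT", "O_neg")]

-- the generator expression feeding sorted(...): ("RESI:ATOM", PRIMITIVE_TYPES[group_idx]) pairs
-- (group_idx is an enumerate index over the 7-element table, always in range, so pyGetD is exact)
def FLAT_PAIRS : List (String × String) :=
  (PySem.List.enumerate SIDECHAIN_ATOMS).flatMap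
    (fun p => p.2.map (fun resi_atom => (resi_atom, PySem.List.pyGetD PRIMITIVE_TYPES p.1 "")))

-- _TABLE = sorted(...): Python sorts (str, str) tuples lexicographically; Python's '<' on str
-- is '<' on .toList (PySem's stated str-comparison bridge), so sorted2 on the two toList keys is exact.
def PY_TABLE : List (String × String) :=
  PySem.List.sorted2 FLAT_PAIRS (fun p => p.1.toList) (fun p => p.2.toList)

def SIDECHAIN_KEYS : List String := PY_TABLE.map (fun p => p.1)
def SIDECHAIN_TYPES : List String := PY_TABLE.map (fun p => p.2)

-- the hand-written 'while lo < hi' binary-search loop; lo, hi, mid stay in 0..len so Nat '/'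
-- is Python's '//' and List.getD is exact for SIDECHAIN_KEYS[mid]
def bisectLoop (keys : List String) (key : String) (lo hi : Nat) : Nat :=
  if lo < hi then
    if (keys.getD ((lo + hi) / 2) "").toList < key.toList then
      bisectLoop keys key ((lo + hi) / 2 + 1) hi
    else
      bisectLoop keys key lo ((lo + hi) / 2)
  else lo
termination_by hi - lo
decreasing_by all_goals omega

def assign_primitive_type_alt (resi_name : String) (atom_name : String) : Option String :=
  match BACKBONE_TYPES.get? atom_name with
  | some bb => some bb   -- 'if bb is not None: return bb'
  | none =>
    -- key = resi_name + ":" + atom_name; lo = the binary-search result (both inlined);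
    -- 'if lo < len(SIDECHAIN_KEYS) and SIDECHAIN_KEYS[lo] == key' (index in range, so getD is exact)
    if bisectLoop SIDECHAIN_KEYS (resi_name ++ ":" ++ atom_name) 0 SIDECHAIN_KEYS.length <
         SIDECHAIN_KEYS.length ∧
       SIDECHAIN_KEYS.getD
         (bisectLoop SIDECHAIN_KEYS (resi_name ++ ":" ++ atom_name) 0 SIDECHAIN_KEYS.length) "" =
         resi_name ++ ":" ++ atom_name then
      some (SIDECHAIN_TYPES.getD
        (bisectLoop SIDECHAIN_KEYS (resi_name ++ ":" ++ atom_name) 0 SIDECHAIN_KEYS.length) "")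
    else none

-- ===== PRECONDITION & SPEC =====
def Spec_assign_primitive_type (resi_name : String) (atom_name : String) (out : Option String) : Prop := out = assign_primitive_type_alt resi_name atom_name
instance (resi_name : String) (atom_name : String) (out : Option String) : Decidable (Spec_assign_primitive_type resi_name atom_name out) := by unfold Spec_assign_primitive_type; infer_instance

-- ===== CLAIM (what is proved, stated in full; the proofs are below) =====
def Claim_equal_assign_primitive_type : Prop := ∀ (resi_name : String) (atom_name : String), Dom_assign_primitive_type resi_name atom_name → Spec_assign_primitive_type resi_name atom_name (assign_primitive_type resi_name atom_name)

-- ===== LEMMAS AND PROOFS =====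

lemma backbone_mk : BACKBONE_TYPES = PySem.Dict.mk
    [("CA", "C_ali"), ("C", "C_ali"), ("O", "O_neu"), ("N", "N_neu"),
     ("OT1", "O_neg"), ("OT2", "O_neg"), ("OC1", "O_neg"), ("OC2", "O_neg"), ("OXT", "O_neg")] := by
  decide

-- the 9-entry backbone dict agrees with A's four guard tests
lemma backbone_get (atom_name : String) :
    BACKBONE_TYPES.get? atom_name =
      if atom_name ∈ (["CA", "C"] : List String) then some "C_ali"
      else if atom_name = "O" then some "O_neu"
      else if atom_name = "N" then some "N_neu"
      else if atom_name ∈ TERMINAL_O then some "O_neg"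
      else none := by
  rw [backbone_mk]
  simp only [PySem.Dict.get?_mk_cons, TERMINAL_O, List.mem_cons, List.not_mem_nil, beq_iff_eq]
  by_cases h1 : "CA" = atom_name; · subst h1; decide
  rw [if_neg h1]
  by_cases h2 : "C" = atom_name; · subst h2; decide
  rw [if_neg h2]
  by_cases h3 : "O" = atom_name; · subst h3; decide
  rw [if_neg h3]
  by_cases h4 : "N" = atom_name; · subst h4; decide
  rw [if_neg h4]
  by_cases h5 : "OT1" = atom_name; · subst h5; decide
  rw [if_neg h5]
  by_cases h6 : "OT2" = atom_name; · subst h6; decide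
  rw [if_neg h6]
  by_cases h7 : "OC1" = atom_name; · subst h7; decide
  rw [if_neg h7]
  by_cases h8 : "OC2" = atom_name; · subst h8; decide
  rw [if_neg h8]
  by_cases h9 : "OXT" = atom_name; · subst h9; decide
  rw [if_neg h9]
  simp only [PySem.Dict.get?, List.find?_nil]
  rw [if_neg (by push Not; exact ⟨Ne.symm h1, Ne.symm h2, trivial⟩), if_neg (Ne.symm h3),
    if_neg (Ne.symm h4),
    if_neg (by push Not; exact ⟨Ne.symm h5, Ne.symm h6, Ne.symm h7, Ne.symm h8, Ne.symm h9, trivial⟩)]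
  rfl

-- find? over one group's (key, t) pairs
lemma find?_map_const (key t : String) (g : List String) :
    (g.map (fun ra => (ra, t))).find? (fun p => p.1 == key) =
      if key ∈ g then some (key, t) else none := by
  induction g with
  | nil => simp
  | cons a rest ih =>
    simp only [List.map_cons, List.find?_cons, List.mem_cons]
    by_cases hka : a = key
    · subst hka; simp
    · have hb : (a == key) = false := by simp [hka]
      have hk : ¬ key = a := fun h => hka h.symm
      simp [hb, hk, ih]

-- A's first-match group scan is the first match in the flat pair list
lemma scan_eq_findFlat (key : String) (gs : List (List String)) (i : Int) :
    scanGroups key (PySem.List.enumerate gs i) =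
      Option.map Prod.snd
        (((PySem.List.enumerate gs i).flatMap
            (fun p => p.2.map (fun ra => (ra, PySem.List.pyGetD PRIMITIVE_TYPES p.1 "")))).find?
          (fun p => p.1 == key)) := by
  induction gs generalizing i with
  | nil => simp [PySem.List.enumerate_nil, scanGroups]
  | cons g rest ih =>
    rw [PySem.List.enumerate_cons]
    simp only [scanGroups, List.flatMap_cons, List.find?_append, find?_map_const]
    by_cases hg : key ∈ g
    · simp [hg]
    · simp [hg, ih]

-- with distinct keys, a pair of the list is determined by its key
lemma eq_of_mem_of_nodup_keys {l : List (String × String)} (h : (l.map Prod.fst).Nodup)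
    {a b : String × String} (ha : a ∈ l) (hb : b ∈ l) (hab : a.1 = b.1) : a = b := by
  induction l with
  | nil => cases ha
  | cons x rest ih =>
    simp only [List.map_cons, List.nodup_cons] at h
    rcases List.mem_cons.mp ha with rfl | ha' <;> rcases List.mem_cons.mp hb with rfl | hb'
    · rfl
    · have hm : b.1 ∈ rest.map Prod.fst := List.mem_map_of_mem hb'
      rw [← hab] at hm; exact absurd hm h.1
    · have hm : a.1 ∈ rest.map Prod.fst := List.mem_map_of_mem ha'
      rw [hab] at hm; exact absurd hm h.1
    · exact ih h.2 ha' hb' 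

set_option maxRecDepth 40000 in
lemma table_keys_sorted : SIDECHAIN_KEYS.Pairwise (fun a b => a.toList < b.toList) := by decide

lemma table_perm_flat : PY_TABLE.Perm FLAT_PAIRS :=
  PySem.List.sorted2_perm FLAT_PAIRS (fun p => p.1.toList) (fun p => p.2.toList) false

lemma table_keys_nodup : (PY_TABLE.map Prod.fst).Nodup := by
  have := table_keys_sorted
  unfold SIDECHAIN_KEYS at this
  exact this.imp (fun {a b} hlt => fun hab => absurd (hab ▸ hlt) (lt_irrefl _))

-- the binary-search loop invariant: the result splits the sorted key list at 'key'
lemma bisectLoop_spec (keys : List String) (key : String)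
    (hsort : keys.Pairwise (fun a b => a.toList < b.toList)) :
    ∀ lo hi, hi ≤ keys.length → lo ≤ hi →
    (∀ j (hj : j < keys.length), j < lo → keys[j].toList < key.toList) →
    (∀ j (hj : j < keys.length), hi ≤ j → ¬ keys[j].toList < key.toList) →
    lo ≤ bisectLoop keys key lo hi ∧ bisectLoop keys key lo hi ≤ hi ∧
    (∀ j (hj : j < keys.length), j < bisectLoop keys key lo hi → keys[j].toList < key.toList) ∧
    (∀ j (hj : j < keys.length), bisectLoop keys key lo hi ≤ j → ¬ keys[j].toList < key.toList) := by
  have hmono : ∀ i j (hi : i < keys.length) (hj : j < keys.length), i < j →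
      keys[i].toList < keys[j].toList := fun i j hi hj hij =>
    List.pairwise_iff_getElem.mp hsort i j hi hj hij
  have hmono' : ∀ i j (hi : i < keys.length) (hj : j < keys.length), i ≤ j →
      keys[i].toList ≤ keys[j].toList := by
    intro i j hi hj hij
    rcases Nat.eq_or_lt_of_le hij with rfl | h
    · exact le_rfl
    · exact le_of_lt (hmono i j hi hj h)
  suffices H : ∀ n lo hi, hi - lo ≤ n → hi ≤ keys.length → lo ≤ hi →
      (∀ j (hj : j < keys.length), j < lo → keys[j].toList < key.toList) →
      (∀ j (hj : j < keys.length), hi ≤ j → ¬ keys[j].toList < key.toList) →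
      lo ≤ bisectLoop keys key lo hi ∧ bisectLoop keys key lo hi ≤ hi ∧
      (∀ j (hj : j < keys.length), j < bisectLoop keys key lo hi → keys[j].toList < key.toList) ∧
      (∀ j (hj : j < keys.length), bisectLoop keys key lo hi ≤ j → ¬ keys[j].toList < key.toList) by
    intro lo hi h1 h2 h3 h4
    exact H (hi - lo) lo hi le_rfl h1 h2 h3 h4
  intro n
  induction n with
  | zero =>
    intro lo hi hfuel hlen hle inv1 inv2
    have heq : lo = hi := by omega
    rw [bisectLoop, if_neg (by omega)]
    exact ⟨le_rfl, hle, inv1, fun j hj hge => inv2 j hj (by omega)⟩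
  | succ n ih =>
    intro lo hi hfuel hlen hle inv1 inv2
    rw [bisectLoop]
    by_cases hlt : lo < hi
    · rw [if_pos hlt]
      have hmlo : lo ≤ (lo + hi) / 2 := by omega
      have hmhi : (lo + hi) / 2 < hi := by omega
      have hmlen : (lo + hi) / 2 < keys.length := by omega
      rw [List.getD_eq_getElem keys "" hmlen]
      by_cases hc : keys[(lo + hi) / 2].toList < key.toList
      · rw [if_pos hc]
        have hinv : ∀ j (hj : j < keys.length), j < (lo + hi) / 2 + 1 →
            keys[j].toList < key.toList := by
          intro j hj hjlt
          rcases Nat.lt_or_ge j lo with h | h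
          · exact inv1 j hj h
          · rcases Nat.eq_or_lt_of_le (by omega : j ≤ (lo + hi) / 2) with rfl | h'
            · exact hc
            · exact lt_trans (hmono j ((lo + hi) / 2) hj hmlen h') hc
        obtain ⟨a1, a2, a3, a4⟩ := ih ((lo + hi) / 2 + 1) hi (by omega) hlen (by omega) hinv inv2
        exact ⟨by omega, a2, a3, a4⟩
      · rw [if_neg hc]
        have hinv : ∀ j (hj : j < keys.length), (lo + hi) / 2 ≤ j →
            ¬ keys[j].toList < key.toList := by
          intro j hj hge
          rcases Nat.lt_or_ge j hi with h | h
          · intro hjlt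
            exact hc (lt_of_le_of_lt (hmono' ((lo + hi) / 2) j hmlen hj hge) hjlt)
          · exact inv2 j hj h
        obtain ⟨a1, a2, a3, a4⟩ := ih lo ((lo + hi) / 2) (by omega) (by omega) (by omega) inv1 hinv
        exact ⟨a1, by omega, a3, a4⟩
    · rw [if_neg hlt]
      exact ⟨le_rfl, hle, inv1, fun j hj hge => inv2 j hj (by omega)⟩

-- the sorted-table binary search computes the first match in the flat pair list
lemma bisect_lookup (key : String) :
    (if bisectLoop SIDECHAIN_KEYS key 0 SIDECHAIN_KEYS.length < SIDECHAIN_KEYS.length ∧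
        SIDECHAIN_KEYS.getD (bisectLoop SIDECHAIN_KEYS key 0 SIDECHAIN_KEYS.length) "" = key then
      some (SIDECHAIN_TYPES.getD (bisectLoop SIDECHAIN_KEYS key 0 SIDECHAIN_KEYS.length) "")
    else none) =
      Option.map Prod.snd (FLAT_PAIRS.find? (fun p => p.1 == key)) := by
  obtain ⟨h0, hr, hlt, hge⟩ :=
    bisectLoop_spec SIDECHAIN_KEYS key table_keys_sorted 0 SIDECHAIN_KEYS.length le_rfl
      (Nat.zero_le _) (fun j hj h => absurd h (Nat.not_lt_zero j))
      (fun j hj h => absurd hj (by omega))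
  set r := bisectLoop SIDECHAIN_KEYS key 0 SIDECHAIN_KEYS.length with hrdef
  have hklen : SIDECHAIN_KEYS.length = PY_TABLE.length := List.length_map ..
  have htlen : SIDECHAIN_TYPES.length = PY_TABLE.length := List.length_map ..
  by_cases hmem : key ∈ SIDECHAIN_KEYS
  · obtain ⟨i, hi, hkey⟩ := List.mem_iff_getElem.mp hmem
    have hri : r ≤ i := by
      by_contra h
      push Not at h
      exact absurd (hlt i hi h) (by rw [hkey]; exact lt_irrefl _)
    have hrlen : r < SIDECHAIN_KEYS.length := lt_of_le_of_lt hri hi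
    have hkeyr : SIDECHAIN_KEYS[r] = key := by
      have h1 : ¬ SIDECHAIN_KEYS[r].toList < key.toList := hge r hrlen le_rfl
      have h2 : SIDECHAIN_KEYS[r].toList ≤ SIDECHAIN_KEYS[i].toList := by
        rcases Nat.eq_or_lt_of_le hri with rfl | h
        · exact le_rfl
        · exact le_of_lt (List.pairwise_iff_getElem.mp table_keys_sorted r i hrlen hi h)
      rw [hkey] at h2
      exact String.toList_inj.mp (le_antisymm h2 (not_lt.mp h1))
    have hrT : r < PY_TABLE.length := by omega
    have htr : PY_TABLE[r] ∈ PY_TABLE := List.getElem_mem hrT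
    have hfst : (PY_TABLE[r]'hrT).1 = key := by
      have h' : SIDECHAIN_KEYS[r]'hrlen = (PY_TABLE[r]'hrT).1 := by
        simp [SIDECHAIN_KEYS]
      exact h'.symm.trans hkeyr
    rw [if_pos ⟨hrlen, by rw [List.getD_eq_getElem _ _ hrlen]; exact hkeyr⟩]
    cases hfind : FLAT_PAIRS.find? (fun p => p.1 == key) with
    | none =>
      exfalso
      exact (List.find?_eq_none.mp hfind (PY_TABLE[r]'hrT) (table_perm_flat.subset htr))
        (beq_iff_eq.mpr hfst)
    | some q =>
      have hq : q.1 = key := by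
        have := List.find?_some hfind
        exact beq_iff_eq.mp this
      have hqT : q ∈ PY_TABLE := table_perm_flat.mem_iff.mpr (List.mem_of_find?_eq_some hfind)
      have hrq : PY_TABLE[r]'hrT = q :=
        eq_of_mem_of_nodup_keys table_keys_nodup htr hqT (hfst.trans hq.symm)
      have hty : SIDECHAIN_TYPES.getD r "" = q.2 := by
        rw [List.getD_eq_getElem _ _ (show r < SIDECHAIN_TYPES.length by omega)]
        have h2 : SIDECHAIN_TYPES[r]'(by omega) = (PY_TABLE[r]'hrT).2 := by
          simp [SIDECHAIN_TYPES]
        exact h2.trans (congrArg Prod.snd hrq)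
      rw [hty]
      rfl
  · rw [if_neg ?hc]
    case hc =>
      rintro ⟨hrlen, heq⟩
      rw [List.getD_eq_getElem _ _ hrlen] at heq
      exact hmem (heq ▸ List.getElem_mem hrlen)
    have hfind : FLAT_PAIRS.find? (fun p => p.1 == key) = none := by
      rw [List.find?_eq_none]
      intro p hp hpk
      have hpkey : p.1 = key := by simpa using hpk
      have hpT : p ∈ PY_TABLE := table_perm_flat.mem_iff.mpr hp
      have : key ∈ SIDECHAIN_KEYS := by
        rw [← hpkey]
        exact List.mem_map_of_mem hpT
      exact hmem this
    rw [hfind]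
    rfl

-- ===== VERDICT (by name: the statement is the Claim_ definition above) =====
theorem assign_primitive_type_spec : Claim_equal_assign_primitive_type := by
  intro resi_name atom_name _
  unfold Spec_assign_primitive_type assign_primitive_type assign_primitive_type_alt
  cases hbb : BACKBONE_TYPES.get? atom_name with
  | some bb =>
    rw [backbone_get] at hbb
    split_ifs at hbb with h1 h2 h3 h4 <;> simp_all
  | none =>
    rw [backbone_get] at hbb
    split_ifs at hbb with h1 h2 h3 h4
    rw [if_neg h1, if_neg h2, if_neg h3, if_neg h4, scan_eq_findFlat]
    exact (bisect_lookup (resi_name ++ ":" ++ atom_name)).symm
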